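-- pv_equiv track=rewrite | github.com/AI-4-SE/White-Box-Performance-Influence-Models | supplementary-website/code/monitoring/monitoring/configcollection.py | parse
-- ===== SOURCE A (Python) =====
-- def parse(cfg):
--     conf = []
--     conf_decoded = cfg.split(' ')[1][1:-1]
--     conf_decoded = conf_decoded.split('%;%')
--
--     # static configuration options:
--
--     conf.append('--files')
--     conf.append('/media/hdd/max/data/spark/')
--
--     conf.append('--language')
--     conf.append('java')
--
--     # dynamic configuration options:
--     if 'skip_duplicate_files' in conf_decoded:
--         conf.append('--skip-duplicate-files')
--
--     if 'failOnViolation' in conf_decoded: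
--         conf.append('--failOnViolation')
--         conf.append('false')
--
--     if 'ignoreliterals' in conf_decoded:
--         conf.append('--ignore-literals')
--
--     if 'ignore_identifiers' in conf_decoded:
--         conf.append('--ignore-identifiers')
--
--     if 'ignore_annotations' in conf_decoded:
--         conf.append('--ignore-annotations')
--
--     if 'text' in conf_decoded:
--         conf.append('--format')
--         conf.append('text')
--
--     if 'csv' in conf_decoded:
--         conf.append('--format')
--         conf.append('csv')
--
--     if 'csv_with_linecount_per_file' in conf_decoded:
--         conf.append('--format')
--         conf.append('csv_with_linecount_per_file')
--
--     if 'xml' in conf_decoded: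
--         conf.append('--format')
--         conf.append('xml')
--
--     if 'vs' in conf_decoded:
--         conf.append('--format')
--         conf.append('vs')
--
--     # handling of numeric features:
--     for el in conf_decoded:
--
--         if el.startswith('minimum_tokens;'):
--             conf.append('--minimum-tokens')
--             conf.append(el[15:])
--
--     return conf
-- ===== SOURCE B (Python) =====
-- _RANK = {
--     'skip_duplicate_files': 0,
--     'failOnViolation': 1,
--     'ignoreliterals': 2,
--     'ignore_identifiers': 3,
--     'ignore_annotations': 4,
--     'text': 5,
--     'csv': 6,
--     'csv_with_linecount_per_file': 7,
--     'xml': 8,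
--     'vs': 9,
-- }
--
-- _ARGS = [
--     ['--skip-duplicate-files'],
--     ['--failOnViolation', 'false'],
--     ['--ignore-literals'],
--     ['--ignore-identifiers'],
--     ['--ignore-annotations'],
--     ['--format', 'text'],
--     ['--format', 'csv'],
--     ['--format', 'csv_with_linecount_per_file'],
--     ['--format', 'xml'],
--     ['--format', 'vs'],
-- ]
--
-- def parse(cfg):
--     tokens = cfg.split(' ')[1][1:-1].split('%;%')
--     # one pass over the tokens: set a flag per recognised option, collect minimum_tokens values
--     flags = [False] * 10
--     mins = []
--     for el in tokens:
--         r = _RANK.get(el)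
--         if r is not None:
--             flags[r] = True
--         if el.startswith('minimum_tokens;'):
--             mins.append(el[15:])
--     conf = ['--files', '/media/hdd/max/data/spark/', '--language', 'java']
--     for f, args in zip(flags, _ARGS):
--         if f:
--             conf += args
--     for m in mins:
--         conf += ['--minimum-tokens', m]
--     return conf
-- ===== Notes on version B (the rewrite author's own statement) =====
-- stated objective: alternative
-- what changed: Instead of A's ten separate membership scans of the token list (one per recognised option), B makes a single pass over the tokens that sets a flag per recognised option via a rank dictionary and collects minimum_tokens values in the same pass, then emits the flags against a fixed args table.
import Mathlib
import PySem

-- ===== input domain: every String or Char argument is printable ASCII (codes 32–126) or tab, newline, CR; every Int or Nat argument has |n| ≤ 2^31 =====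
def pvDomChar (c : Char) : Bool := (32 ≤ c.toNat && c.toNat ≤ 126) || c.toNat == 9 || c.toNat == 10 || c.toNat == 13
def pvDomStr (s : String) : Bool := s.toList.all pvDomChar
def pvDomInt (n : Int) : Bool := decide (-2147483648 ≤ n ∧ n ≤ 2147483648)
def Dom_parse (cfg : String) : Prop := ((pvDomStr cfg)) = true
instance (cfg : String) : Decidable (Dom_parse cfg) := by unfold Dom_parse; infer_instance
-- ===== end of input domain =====

-- B replaces A's ten separate membership scans over the token list by ONE pass over the tokens
-- (a rank lookup sets a flag per recognised option, minimum_tokens values are collected in the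
-- same pass), then emits the flags against a fixed args table; same output, alternative shape.

-- ===== PORT A =====
def parse (cfg : String) : List String :=
  let conf : List String := []
  let conf_decoded := PySem.Str.slice ((PySem.List.pyGet? ((PySem.Str.split? cfg " ").getD []) 1).getD "") (some 1) (some (-1))
  let conf_decoded := (PySem.Str.split? conf_decoded "%;%").getD []
  let conf := conf ++ ["--files"]
  let conf := conf ++ ["/media/hdd/max/data/spark/"]
  let conf := conf ++ ["--language"]
  let conf := conf ++ ["java"]
  let conf := if conf_decoded.contains "skip_duplicate_files" then conf ++ ["--skip-duplicate-files"] else conf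
  let conf := if conf_decoded.contains "failOnViolation" then conf ++ ["--failOnViolation"] ++ ["false"] else conf
  let conf := if conf_decoded.contains "ignoreliterals" then conf ++ ["--ignore-literals"] else conf
  let conf := if conf_decoded.contains "ignore_identifiers" then conf ++ ["--ignore-identifiers"] else conf
  let conf := if conf_decoded.contains "ignore_annotations" then conf ++ ["--ignore-annotations"] else conf
  let conf := if conf_decoded.contains "text" then conf ++ ["--format"] ++ ["text"] else conf
  let conf := if conf_decoded.contains "csv" then conf ++ ["--format"] ++ ["csv"] else conf
  let conf := if conf_decoded.contains "csv_with_linecount_per_file" then conf ++ ["--format"] ++ ["csv_with_linecount_per_file"] else conf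
  let conf := if conf_decoded.contains "xml" then conf ++ ["--format"] ++ ["xml"] else conf
  let conf := if conf_decoded.contains "vs" then conf ++ ["--format"] ++ ["vs"] else conf
  conf_decoded.foldl (fun c el =>
    if PySem.Str.startswith el "minimum_tokens;" then
      c ++ ["--minimum-tokens"] ++ [PySem.Str.slice el (some 15) none]
    else c) conf

-- ===== PORT B =====
def parseRank : PySem.Dict String Nat :=
  PySem.Dict.mk
    [ ("skip_duplicate_files", 0), ("failOnViolation", 1), ("ignoreliterals", 2),
      ("ignore_identifiers", 3), ("ignore_annotations", 4), ("text", 5),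
      ("csv", 6), ("csv_with_linecount_per_file", 7), ("xml", 8), ("vs", 9) ]

def parseArgs : List (List String) :=
  [ ["--skip-duplicate-files"],
    ["--failOnViolation", "false"],
    ["--ignore-literals"],
    ["--ignore-identifiers"],
    ["--ignore-annotations"],
    ["--format", "text"],
    ["--format", "csv"],
    ["--format", "csv_with_linecount_per_file"],
    ["--format", "xml"],
    ["--format", "vs"] ]

-- the body of B's single loop over the tokens
def parseStep (st : List Bool × List String) (el : String) : List Bool × List String :=
  let st := match PySem.Dict.get? parseRank el with
    | some r => (st.1.set r true, st.2)
    | none => st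
  if PySem.Str.startswith el "minimum_tokens;" then
    (st.1, st.2 ++ [PySem.Str.slice el (some 15) none])
  else st

def parse_alt (cfg : String) : List String :=
  let tokens := (PySem.Str.split?
    (PySem.Str.slice ((PySem.List.pyGet? ((PySem.Str.split? cfg " ").getD []) 1).getD "") (some 1) (some (-1))) "%;%").getD []
  let st := tokens.foldl parseStep (List.replicate 10 false, [])
  let conf := (st.1.zip parseArgs).foldl
    (fun c p => if p.1 then c ++ p.2 else c)
    ["--files", "/media/hdd/max/data/spark/", "--language", "java"]
  st.2.foldl (fun c m => c ++ ["--minimum-tokens", m]) conf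

-- ===== PRECONDITION & SPEC =====
-- Pre_ excludes cfg without a space: there cfg.split(' ')[1] raises IndexError in A.
def Pre_parse (cfg : String) : Prop := PySem.Str.isIn " " cfg = true
instance (cfg : String) : Decidable (Pre_parse cfg) := by unfold Pre_parse; infer_instance
def pvWitness_parse : String := "x [text%;%minimum_tokens;50] y"
def Spec_parse (cfg : String) (out : List String) : Prop := out = parse_alt cfg
instance (cfg : String) (out : List String) : Decidable (Spec_parse cfg out) := by unfold Spec_parse; infer_instance

-- ===== CLAIM (what is proved, stated in full; the proofs are below) =====
def Claim_equal_parse : Prop := ∀ (cfg : String), Dom_parse cfg → Pre_parse cfg → Spec_parse cfg (parse cfg)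

-- ===== LEMMAS AND PROOFS =====

-- the rank dictionary, looked up
lemma get?_parseRank (el : String) :
    PySem.Dict.get? parseRank el =
    if el = "skip_duplicate_files" then some 0 else if el = "failOnViolation" then some 1
    else if el = "ignoreliterals" then some 2 else if el = "ignore_identifiers" then some 3
    else if el = "ignore_annotations" then some 4 else if el = "text" then some 5
    else if el = "csv" then some 6 else if el = "csv_with_linecount_per_file" then some 7
    else if el = "xml" then some 8 else if el = "vs" then some 9 else none := by
  split_ifs with h0 h1 h2 h3 h4 h5 h6 h7 h8 h9
  · subst h0; decide
  · subst h1; decide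
  · subst h2; decide
  · subst h3; decide
  · subst h4; decide
  · subst h5; decide
  · subst h6; decide
  · subst h7; decide
  · subst h8; decide
  · subst h9; decide
  · simp [parseRank, PySem.Dict.get?, Ne.symm h0, Ne.symm h1, Ne.symm h2, Ne.symm h3,
      Ne.symm h4, Ne.symm h5, Ne.symm h6, Ne.symm h7, Ne.symm h8, Ne.symm h9]

-- B's single pass: the flags end up as the ten membership tests, the collected
-- minimum_tokens values as the filtered slices, in token order
set_option maxHeartbeats 2000000 in
lemma parse_alt_pass (ts : List String) (b0 b1 b2 b3 b4 b5 b6 b7 b8 b9 : Bool) (ms : List String) :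
    ts.foldl parseStep ([b0, b1, b2, b3, b4, b5, b6, b7, b8, b9], ms)
    = ([b0 || ts.contains "skip_duplicate_files",
        b1 || ts.contains "failOnViolation",
        b2 || ts.contains "ignoreliterals",
        b3 || ts.contains "ignore_identifiers",
        b4 || ts.contains "ignore_annotations",
        b5 || ts.contains "text",
        b6 || ts.contains "csv",
        b7 || ts.contains "csv_with_linecount_per_file",
        b8 || ts.contains "xml",
        b9 || ts.contains "vs"],
       ms ++ (ts.filter (fun el => PySem.Str.startswith el "minimum_tokens;")).map
              (fun el => PySem.Str.slice el (some 15) none)) := by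
  induction ts generalizing b0 b1 b2 b3 b4 b5 b6 b7 b8 b9 ms with
  | nil =>
    simp only [List.foldl_nil, List.contains_nil, Bool.or_false, List.filter_nil,
      List.map_nil, List.append_nil]
  | cons el ts ih =>
    by_cases hs : PySem.Str.startswith el "minimum_tokens;" = true <;>
    · simp only [List.foldl_cons, parseStep, get?_parseRank, hs, if_true, if_false,
        Bool.false_eq_true, List.filter_cons, List.map_cons]
      split_ifs with h0 h1 h2 h3 h4 h5 h6 h7 h8 h9
      · subst h0; simp [ih]
      · subst h1; simp [ih]
      · subst h2; simp [ih]
      · subst h3; simp [ih]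
      · subst h4; simp [ih]
      · subst h5; simp [ih]
      · subst h6; simp [ih]
      · subst h7; simp [ih]
      · subst h8; simp [ih]
      · subst h9; simp [ih]
      · simp [ih, Ne.symm h0, Ne.symm h1, Ne.symm h2, Ne.symm h3, Ne.symm h4,
          Ne.symm h5, Ne.symm h6, Ne.symm h7, Ne.symm h8, Ne.symm h9]

-- A's trailing minimum_tokens loop equals B's loop over the collected values
lemma mins_fold_eq (ts : List String) (c : List String) :
    ts.foldl (fun c el =>
      if PySem.Str.startswith el "minimum_tokens;" then
        c ++ ["--minimum-tokens"] ++ [PySem.Str.slice el (some 15) none]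
      else c) c
    = ((ts.filter (fun el => PySem.Str.startswith el "minimum_tokens;")).map
        (fun el => PySem.Str.slice el (some 15) none)).foldl
        (fun c m => c ++ ["--minimum-tokens", m]) c := by
  induction ts generalizing c with
  | nil => rfl
  | cons el ts ih =>
    simp only [List.foldl_cons]
    rw [ih]
    by_cases hs : PySem.Str.startswith el "minimum_tokens;" = true <;>
      simp only [List.filter_cons, hs, if_true, if_false, Bool.false_eq_true,
        List.map_cons, List.foldl_cons, List.append_assoc, List.cons_append,
        List.nil_append]

-- ===== VERDICT (by name: the statement is the Claim_ definition above) =====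
set_option maxHeartbeats 1000000 in
theorem parse_spec : Claim_equal_parse := by
  intro cfg _ _
  unfold Spec_parse parse parse_alt
  simp only [show (List.replicate 10 false : List Bool)
      = [false, false, false, false, false, false, false, false, false, false] from rfl]
  generalize (PySem.Str.split?
    (PySem.Str.slice ((PySem.List.pyGet? ((PySem.Str.split? cfg " ").getD []) 1).getD "") (some 1) (some (-1)))
    "%;%").getD [] = ts
  rw [parse_alt_pass, mins_fold_eq]
  simp only [Bool.false_or, parseArgs, List.zip_cons_cons, List.zip_nil_right,
    List.foldl_cons, List.foldl_nil, List.nil_append, List.cons_append, List.append_assoc]
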